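-- pv_equiv track=rewrite | github.com/gabrielbsrj/rebeka | agent/vps/sync_server.py | _infer_growth_target_from_values
-- ===== SOURCE A (Python) =====
-- from typing import List, Dict, Any, Callable, Optional
--
-- def _infer_growth_target_from_values(values: Optional[List[str]]) -> Optional[Dict[str, Any]]:
--     if not values:
--         return None
--     values_set = {str(v).strip().lower() for v in values if v}
--     if {"controle", "responsabilidade"} & values_set:
--         return {
--             "domain": "finance",
--             "current_state_declared": "pressao por controle financeiro",
--             "desired_future_state": "rotina financeira previsivel e automatizada",
--         }
--     if {"confiabilidade", "reputacao"} & values_set: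
--         return {
--             "domain": "growth",
--             "current_state_declared": "carga de prazos e entregas",
--             "desired_future_state": "execucao consistente com previsibilidade",
--         }
--     if {"cuidado", "bem_estar"} & values_set:
--         return {
--             "domain": "user",
--             "current_state_declared": "energia emocional sob demanda",
--             "desired_future_state": "rotina com mais estabilidade e recuperacao",
--         }
--     return None
-- ===== SOURCE B (Python) =====
-- from typing import List, Dict, Any, Optional
--
-- # keyword -> priority of the branch it triggers (lower = higher priority)
-- _PRIORITY = {
--     "controle": 0, "responsabilidade": 0,
--     "confiabilidade": 1, "reputacao": 1,
--     "cuidado": 2, "bem_estar": 2,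
-- }
--
-- # priority -> growth-target dict
-- _RESULTS = {
--     0: {
--         "domain": "finance",
--         "current_state_declared": "pressao por controle financeiro",
--         "desired_future_state": "rotina financeira previsivel e automatizada",
--     },
--     1: {
--         "domain": "growth",
--         "current_state_declared": "carga de prazos e entregas",
--         "desired_future_state": "execucao consistente com previsibilidade",
--     },
--     2: {
--         "domain": "user",
--         "current_state_declared": "energia emocional sob demanda",
--         "desired_future_state": "rotina com mais estabilidade e recuperacao",
--     },
-- }
--
-- def _infer_growth_target_from_values(values: Optional[List[str]]) -> Optional[Dict[str, Any]]:
--     # Single pass over the raw values: normalize each one, look up the branch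
--     # it would trigger, and keep the best (lowest) priority seen.  No set is
--     # built and no keyword group is scanned.
--     best = None
--     for v in values or []:
--         if not v:
--             continue
--         p = _PRIORITY.get(str(v).strip().lower())
--         if p is not None and (best is None or p < best):
--             best = p
--     return None if best is None else _RESULTS.get(best)
-- ===== Notes on version B (the rewrite author's own statement) =====
-- stated objective: alternative
-- what changed: Instead of building a normalized value set and intersecting it with three keyword groups in an if-chain, B makes a single pass over the raw values, looks each normalized value up in a keyword->priority dict, keeps the minimum priority seen, and maps that priority to its result dict.
import Mathlib
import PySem

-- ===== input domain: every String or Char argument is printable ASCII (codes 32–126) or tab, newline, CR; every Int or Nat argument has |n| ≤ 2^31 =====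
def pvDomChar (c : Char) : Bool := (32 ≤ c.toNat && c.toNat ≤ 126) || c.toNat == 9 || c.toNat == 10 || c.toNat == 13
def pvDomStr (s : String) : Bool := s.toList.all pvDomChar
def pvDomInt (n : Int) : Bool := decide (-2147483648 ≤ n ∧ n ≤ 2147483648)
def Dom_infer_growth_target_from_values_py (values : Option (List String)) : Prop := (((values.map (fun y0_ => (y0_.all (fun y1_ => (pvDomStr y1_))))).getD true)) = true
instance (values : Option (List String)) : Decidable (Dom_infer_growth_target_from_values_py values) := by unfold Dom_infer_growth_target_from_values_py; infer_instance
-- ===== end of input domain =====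

-- B replaces A's normalized-set + three keyword-group intersections by a single pass over the raw
-- values that keeps the minimum branch priority via a keyword->priority dict (alternative decomposition).

-- ===== PORT A =====
def infer_growth_target_from_values_py (values : Option (List String)) : Option (List (String × String)) :=
  match values with
  | none => none
  | some vs =>
    if vs = [] then none
    else
      let values_set : PySem.Set String :=
        PySem.Set.ofList ((vs.filter (fun v => v ≠ "")).map (fun v => PySem.Str.lower (PySem.Str.strip v)))
      if PySem.Set.inter (PySem.Set.ofList ["controle", "responsabilidade"]) values_set ≠ [] then
        some [("domain", "finance"),
              ("current_state_declared", "pressao por controle financeiro"),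
              ("desired_future_state", "rotina financeira previsivel e automatizada")]
      else if PySem.Set.inter (PySem.Set.ofList ["confiabilidade", "reputacao"]) values_set ≠ [] then
        some [("domain", "growth"),
              ("current_state_declared", "carga de prazos e entregas"),
              ("desired_future_state", "execucao consistente com previsibilidade")]
      else if PySem.Set.inter (PySem.Set.ofList ["cuidado", "bem_estar"]) values_set ≠ [] then
        some [("domain", "user"),
              ("current_state_declared", "energia emocional sob demanda"),
              ("desired_future_state", "rotina com mais estabilidade e recuperacao")]
      else none

-- ===== PORT B =====
-- _PRIORITY: keyword -> priority of the branch it triggers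
def prioDict : PySem.Dict String Int :=
  PySem.Dict.ofList
    [("controle", 0), ("responsabilidade", 0),
     ("confiabilidade", 1), ("reputacao", 1),
     ("cuidado", 2), ("bem_estar", 2)]

-- _RESULTS: priority -> growth-target dict
def resultsDict : PySem.Dict Int (List (String × String)) :=
  PySem.Dict.ofList
    [(0, [("domain", "finance"),
          ("current_state_declared", "pressao por controle financeiro"),
          ("desired_future_state", "rotina financeira previsivel e automatizada")]),
     (1, [("domain", "growth"),
          ("current_state_declared", "carga de prazos e entregas"),
          ("desired_future_state", "execucao consistente com previsibilidade")]),
     (2, [("domain", "user"),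
          ("current_state_declared", "energia emocional sob demanda"),
          ("desired_future_state", "rotina com mais estabilidade e recuperacao")])]

-- one iteration of B's loop body (continue on falsy v; keep the lower priority)
def bStep (best : Option Int) (v : String) : Option Int :=
  if v = "" then best
  else
    match PySem.Dict.get? prioDict (PySem.Str.lower (PySem.Str.strip v)) with
    | none => best
    | some p =>
      match best with
      | none => some p
      | some b => if p < b then some p else some b

def infer_growth_target_from_values_py_alt (values : Option (List String)) : Option (List (String × String)) :=
  let best := (values.getD []).foldl bStep none
  match best with
  | none => none
  | some b => PySem.Dict.get? resultsDict b

-- ===== PRECONDITION & SPEC =====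
def Spec_infer_growth_target_from_values_py (values : Option (List String)) (out : Option (List (String × String))) : Prop := out = infer_growth_target_from_values_py_alt values
instance (values : Option (List String)) (out : Option (List (String × String))) : Decidable (Spec_infer_growth_target_from_values_py values out) := by unfold Spec_infer_growth_target_from_values_py; infer_instance

-- ===== CLAIM (what is proved, stated in full; the proofs are below) =====
def Claim_equal_infer_growth_target_from_values_py : Prop := ∀ (values : Option (List String)), Dom_infer_growth_target_from_values_py values → Spec_infer_growth_target_from_values_py values (infer_growth_target_from_values_py values)

-- ===== LEMMAS AND PROOFS =====

-- normalization used by both programs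
def pvNorm (v : String) : String := PySem.Str.lower (PySem.Str.strip v)

-- "some value triggers branch i"
def pvHit (vs : List String) (i : Int) : Bool :=
  vs.any (fun v => !(v == "") && (PySem.Dict.get? prioDict (pvNorm v) == some i))

-- min on Option Int (none = +inf)
def pvMinO (x y : Option Int) : Option Int :=
  match x, y with
  | none, y => y
  | x, none => x
  | some a, some b => some (min a b)

theorem prio_mk : prioDict = PySem.Dict.mk
    [("controle", 0), ("responsabilidade", 0),
     ("confiabilidade", 1), ("reputacao", 1),
     ("cuidado", 2), ("bem_estar", 2)] := by rfl

theorem bStep_eq_minO (acc : Option Int) (v : String) :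
    bStep acc v = pvMinO acc (bStep none v) := by
  unfold bStep
  by_cases h : v = ""
  · rw [if_pos h, if_pos h]; cases acc <;> rfl
  · rw [if_neg h, if_neg h]
    cases PySem.Dict.get? prioDict (PySem.Str.lower (PySem.Str.strip v)) with
    | none => cases acc <;> rfl
    | some p => cases acc with
      | none => rfl
      | some b => simp only [pvMinO, min_def]; split_ifs <;> (try rfl) <;> (exfalso; omega)

theorem pvMinO_assoc (x y z : Option Int) : pvMinO (pvMinO x y) z = pvMinO x (pvMinO y z) := by
  cases x <;> cases y <;> cases z <;> simp [pvMinO, min_assoc]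

theorem foldl_bStep_acc (vs : List String) (acc : Option Int) :
    vs.foldl bStep acc = pvMinO acc (vs.foldl bStep none) := by
  induction vs generalizing acc with
  | nil => cases acc <;> rfl
  | cons v vs ih =>
    simp only [List.foldl_cons]
    rw [ih (bStep acc v), ih (bStep none v), bStep_eq_minO acc v, pvMinO_assoc]

-- possible values of a priority lookup
theorem prio_cases (k : String) :
    PySem.Dict.get? prioDict k = none ∨ PySem.Dict.get? prioDict k = some 0 ∨
    PySem.Dict.get? prioDict k = some 1 ∨ PySem.Dict.get? prioDict k = some 2 := by
  rw [prio_mk]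
  simp only [PySem.Dict.get?_mk_cons, beq_iff_eq]
  split_ifs <;> simp [PySem.Dict.get?]

-- B's fold computes the first-hit branch
theorem opt_match_id (o : Option Int) :
    (match o with | none => (none : Option Int) | some p => some p) = o := by
  cases o <;> rfl

theorem foldl_bStep_char (vs : List String) :
    vs.foldl bStep none =
      (if pvHit vs 0 then some 0 else if pvHit vs 1 then some 1
       else if pvHit vs 2 then some 2 else none) := by
  induction vs with
  | nil => rfl
  | cons v vs ih =>
    simp only [List.foldl_cons]
    rw [foldl_bStep_acc vs (bStep none v), ih]
    by_cases hv : v = ""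
    · have hs : bStep none v = none := by rw [bStep, if_pos hv]
      have h0 : ∀ i, pvHit (v :: vs) i = pvHit vs i := fun i => by
        simp [pvHit, List.any_cons, hv]
      simp only [hs, h0]
      rfl
    · have hs : bStep none v = PySem.Dict.get? prioDict (pvNorm v) := by
        unfold bStep pvNorm
        rw [if_neg hv]
        generalize PySem.Dict.get? prioDict (PySem.Str.lower (PySem.Str.strip v)) = o
        exact opt_match_id o
      have hbv : (v == "") = false := by simp [hv]
      have h0 : ∀ i, pvHit (v :: vs) i =
          ((PySem.Dict.get? prioDict (pvNorm v) == some i) || pvHit vs i) := fun i => by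
        simp [pvHit, List.any_cons, hbv]
      rcases prio_cases (pvNorm v) with h | h | h | h <;>
        simp only [hs, h0, h] <;>
        by_cases hb0 : pvHit vs 0 = true <;> by_cases hb1 : pvHit vs 1 = true <;>
        by_cases hb2 : pvHit vs 2 = true <;>
        simp_all [pvMinO]

-- A's branch test equals pvHit
theorem inter_eq_hit (vs : List String) (grp : List String) (i : Int)
    (hg : ∀ k, k ∈ grp ↔ PySem.Dict.get? prioDict k = some i) :
    (PySem.Set.inter (PySem.Set.ofList grp)
        (PySem.Set.ofList ((vs.filter (fun v => v ≠ "")).map pvNorm)) ≠ []) ↔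
      pvHit vs i = true := by
  constructor
  · intro hne
    obtain ⟨y, hy⟩ := List.exists_mem_of_ne_nil _ hne
    rw [PySem.Set.mem_inter] at hy
    obtain ⟨hy1, hy2⟩ := hy
    rw [PySem.Set.mem_ofList] at hy1 hy2
    simp only [List.mem_map, List.mem_filter] at hy2
    obtain ⟨v, ⟨hv, hne'⟩, hnorm⟩ := hy2
    simp only [pvHit, List.any_eq_true]
    refine ⟨v, hv, ?_⟩
    have := (hg y).mp hy1
    simp only [Bool.and_eq_true, beq_iff_eq]
    exact ⟨by simpa using hne', by rw [hnorm]; exact this⟩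
  · intro hh
    simp only [pvHit, List.any_eq_true, Bool.and_eq_true, beq_iff_eq] at hh
    obtain ⟨v, hv, hne', hlook⟩ := hh
    apply List.ne_nil_of_mem (a := pvNorm v)
    rw [PySem.Set.mem_inter, PySem.Set.mem_ofList, PySem.Set.mem_ofList]
    refine ⟨(hg (pvNorm v)).mpr hlook, ?_⟩
    simp only [List.mem_map, List.mem_filter]
    exact ⟨v, ⟨hv, by simpa using hne'⟩, rfl⟩

theorem grp0 (k : String) : k ∈ (["controle", "responsabilidade"] : List String) ↔ PySem.Dict.get? prioDict k = some 0 := by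
  constructor
  · intro h
    rcases List.mem_cons.mp h with rfl | h
    · decide
    · rcases List.mem_cons.mp h with rfl | h
      · decide
      · simp at h
  · intro h
    rw [prio_mk] at h
    simp only [PySem.Dict.get?_mk_cons, beq_iff_eq] at h
    split_ifs at h with h1 h2 h3 h4 h5 h6 <;> subst_vars <;>
      first
      | decide
      | exact absurd h (by decide)
      | simp [PySem.Dict.get?] at h

theorem grp1 (k : String) : k ∈ (["confiabilidade", "reputacao"] : List String) ↔ PySem.Dict.get? prioDict k = some 1 := by
  constructor
  · intro h
    rcases List.mem_cons.mp h with rfl | h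
    · decide
    · rcases List.mem_cons.mp h with rfl | h
      · decide
      · simp at h
  · intro h
    rw [prio_mk] at h
    simp only [PySem.Dict.get?_mk_cons, beq_iff_eq] at h
    split_ifs at h with h1 h2 h3 h4 h5 h6 <;> subst_vars <;>
      first
      | decide
      | exact absurd h (by decide)
      | simp [PySem.Dict.get?] at h

theorem grp2 (k : String) : k ∈ (["cuidado", "bem_estar"] : List String) ↔ PySem.Dict.get? prioDict k = some 2 := by
  constructor
  · intro h
    rcases List.mem_cons.mp h with rfl | h
    · decide
    · rcases List.mem_cons.mp h with rfl | h
      · decide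
      · simp at h
  · intro h
    rw [prio_mk] at h
    simp only [PySem.Dict.get?_mk_cons, beq_iff_eq] at h
    split_ifs at h with h1 h2 h3 h4 h5 h6 <;> subst_vars <;>
      first
      | decide
      | exact absurd h (by decide)
      | simp [PySem.Dict.get?] at h

-- ===== VERDICT (by name: the statement is the Claim_ definition above) =====
theorem infer_growth_target_from_values_py_spec : Claim_equal_infer_growth_target_from_values_py := by
  intro values _
  unfold Spec_infer_growth_target_from_values_py
  cases values with
  | none => rfl
  | some vs =>
    unfold infer_growth_target_from_values_py infer_growth_target_from_values_py_alt
    simp only [Option.getD_some]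
    rw [show (fun v => PySem.Str.lower (PySem.Str.strip v)) = pvNorm from rfl,
      foldl_bStep_char vs]
    by_cases hnil : vs = []
    · subst hnil; rfl
    · simp only [hnil, if_false]
      by_cases h0 : pvHit vs 0 = true
      · rw [if_pos ((inter_eq_hit vs _ 0 grp0).mpr h0)]
        simp [h0]; rfl
      · rw [if_neg (fun h => h0 ((inter_eq_hit vs _ 0 grp0).mp h))]
        rw [Bool.not_eq_true] at h0
        by_cases h1 : pvHit vs 1 = true
        · rw [if_pos ((inter_eq_hit vs _ 1 grp1).mpr h1)]
          simp [h0, h1]; rfl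
        · rw [if_neg (fun h => h1 ((inter_eq_hit vs _ 1 grp1).mp h))]
          rw [Bool.not_eq_true] at h1
          by_cases h2 : pvHit vs 2 = true
          · rw [if_pos ((inter_eq_hit vs _ 2 grp2).mpr h2)]
            simp [h0, h1, h2]; rfl
          · rw [if_neg (fun h => h2 ((inter_eq_hit vs _ 2 grp2).mp h))]
            rw [Bool.not_eq_true] at h2
            simp [h0, h1, h2]
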